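-- pv_equiv track=rewrite | github.com/jwparks/Algorithm | problems/2108_solved.py | return_key
-- ===== SOURCE A (Python) =====
-- def return_key(dic):
--     values = list(dic.values())
--     keys = list(dic.keys())
--     max_value = max(values)
--     keys_return = []
--     for v, value in enumerate(values):
--         if value == max_value:
--             keys_return.append(keys[v])
--     if len(keys_return) > 1:
--         keys_return.sort()
--         return keys_return[1]
--     else:
--         return keys_return[0]
-- ===== SOURCE B (Python) =====
-- def return_key(dic):
--     max_value = max(dic.values())
--     matches = [k for k, v in dic.items() if v == max_value]
--     if len(matches) == 1:
--         return matches[0]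
--     m1 = min(matches)
--     return min(k for k in matches if k != m1)
-- ===== Notes on version B (the rewrite author's own statement) =====
-- stated objective: simpler
-- what changed: Replaces the enumerate/index loop plus full sort with a filter of the max-valued keys followed by two min() selections (the smallest and then the smallest of the rest), so no sort is performed.
import Mathlib
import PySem

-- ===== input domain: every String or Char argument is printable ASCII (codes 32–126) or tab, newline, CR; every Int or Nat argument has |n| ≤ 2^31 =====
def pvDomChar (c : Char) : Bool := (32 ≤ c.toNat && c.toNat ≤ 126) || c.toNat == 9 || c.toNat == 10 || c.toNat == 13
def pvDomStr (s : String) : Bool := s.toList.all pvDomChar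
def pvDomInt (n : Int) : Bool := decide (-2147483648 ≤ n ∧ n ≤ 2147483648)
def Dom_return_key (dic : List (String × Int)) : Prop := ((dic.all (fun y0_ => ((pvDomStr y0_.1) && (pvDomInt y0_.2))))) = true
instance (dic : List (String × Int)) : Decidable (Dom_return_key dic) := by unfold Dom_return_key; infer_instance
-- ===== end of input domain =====

-- B replaces the enumerate/index loop and the full sort of A by a filter of the
-- max-valued keys followed by two min() selections (simpler, no sort).

-- ===== PORT A =====
def return_key (dic : List (String × Int)) : String :=
  let values := dic.map (·.2)
  let keys := dic.map (·.1)
  let max_value := (PySem.List.max? values (fun v => v)).getD 0  -- default unreachable: Pre_ excludes the empty dict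
  let keys_return := (PySem.List.enumerate values).foldl
    (fun acc p => if p.2 = max_value then acc ++ [PySem.List.pyGetD keys p.1 ""] else acc) []
  if keys_return.length > 1 then
    PySem.List.pyGetD (PySem.List.sorted keys_return (fun x => x) false) 1 ""
  else
    PySem.List.pyGetD keys_return 0 ""

-- ===== PORT B =====
def return_key_alt (dic : List (String × Int)) : String :=
  let max_value := (PySem.List.max? (dic.map (·.2)) (fun v => v)).getD 0  -- default unreachable: Pre_ excludes the empty dict
  let mtchs := (dic.filter (fun p => p.2 = max_value)).map (·.1)
  if mtchs.length = 1 then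
    PySem.List.pyGetD mtchs 0 ""
  else
    let m1 := (PySem.List.min? mtchs (fun x => x)).getD ""
    (PySem.List.min? (mtchs.filter (fun k => k != m1)) (fun x => x)).getD ""

-- ===== PRECONDITION & SPEC =====
-- Pre_ excludes the empty list, on which Python's max() raises ValueError, and
-- lists with duplicate keys, which no Python dict can contain.
def Pre_return_key (dic : List (String × Int)) : Prop :=
  dic ≠ [] ∧ (dic.map (·.1)).Nodup
instance (dic : List (String × Int)) : Decidable (Pre_return_key dic) := by
  unfold Pre_return_key; infer_instance
def pvWitness_return_key : (List (String × Int)) := [("a", 2), ("b", 2), ("c", 1)]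
def Spec_return_key (dic : List (String × Int)) (out : String) : Prop := out = return_key_alt dic
instance (dic : List (String × Int)) (out : String) : Decidable (Spec_return_key dic out) := by unfold Spec_return_key; infer_instance

-- ===== CLAIM (what is proved, stated in full; the proofs are below) =====
def Claim_equal_return_key : Prop := ∀ (dic : List (String × Int)), Dom_return_key dic → Pre_return_key dic → Spec_return_key dic (return_key dic)

-- ===== LEMMAS AND PROOFS =====

-- A's append loop over enumerate(values), looking keys up by index, builds
-- exactly B's filtered key list.
theorem pv_keys_return_eq (mv : Int) :
    ∀ (post pre : List (String × Int)) (acc : List String),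
      (PySem.List.enumerate (post.map (·.2)) (pre.length : Int)).foldl
        (fun acc p => if p.2 = mv then
            acc ++ [PySem.List.pyGetD ((pre ++ post).map (·.1)) p.1 ""] else acc) acc
      = acc ++ (post.filter (fun p => p.2 = mv)).map (·.1) := by
  intro post
  induction post with
  | nil => intro pre acc; simp
  | cons x t ih =>
    intro pre acc
    have hidx : PySem.List.pyGetD ((pre ++ x :: t).map (·.1)) (pre.length : Int) "" = x.1 := by
      have : ((pre ++ x :: t).map (·.1)) = pre.map (·.1) ++ x.1 :: t.map (·.1) := by simp
      rw [this, PySem.List.pyGetD_natCast]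
      have hl : (pre.map (·.1) : List String).length = pre.length := by simp
      rw [List.getD, List.getElem?_append_right (by omega)]
      simp
    have harr : (pre.length : Int) + 1 = ((pre ++ [x]).length : Int) := by
      simp
    have hkeys : ((pre ++ x :: t).map (·.1)) = (((pre ++ [x]) ++ t).map (·.1)) := by simp
    simp only [List.map_cons, PySem.List.enumerate_cons, List.foldl_cons, hidx]
    by_cases hx : x.2 = mv
    · simp only [hx, if_true]
      rw [harr, hkeys, ih (pre ++ [x])]
      simp [hx]
    · simp only [if_neg hx]
      rw [harr, hkeys, ih (pre ++ [x])]
      simp [hx]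

-- sorted of a nonempty nodup list = its min, then sorted of the rest.
theorem pv_sorted_min_cons (l : List String) (m : String)
    (hnd : l.Nodup) (hm : PySem.List.min? l (fun x => x) = some m) :
    PySem.List.sorted l (fun x => x) false
      = m :: PySem.List.sorted (l.filter (fun k => k != m)) (fun x => x) false := by
  have hmem : m ∈ l := PySem.List.min?_mem hm
  have hmin : ∀ y ∈ l, m ≤ y := by
    intro y hy; exact PySem.List.min?_isMin hm y hy
  have hfil : l.erase m = l.filter (fun k => k != m) := List.Nodup.erase_eq_filter hnd m
  have hperm : (m :: PySem.List.sorted (l.filter (fun k => k != m)) (fun x => x) false).Perm l := by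
    have h1 : (PySem.List.sorted (l.filter (fun k => k != m)) (fun x => x) false).Perm
        (l.filter (fun k => k != m)) := PySem.List.sorted_perm _ _ _
    have h2 : (m :: l.filter (fun k => k != m)).Perm l := by
      rw [← hfil]; exact (List.perm_cons_erase hmem).symm
    exact List.Perm.trans (List.Perm.cons m h1) h2
  have hndf : (l.filter (fun k => k != m)).Nodup := List.Nodup.filter _ hnd
  have hnds : (PySem.List.sorted (l.filter (fun k => k != m)) (fun x => x) false).Nodup :=
    (PySem.List.sorted_perm _ _ _).nodup_iff.mpr hndf
  have hple : (PySem.List.sorted (l.filter (fun k => k != m)) (fun x => x) false).Pairwise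
      (fun a b => a ≤ b) := PySem.List.sorted_pairwise _ _
  have hplt : (PySem.List.sorted (l.filter (fun k => k != m)) (fun x => x) false).Pairwise
      (fun a b => a < b) := by
    refine List.Pairwise.imp₂ (fun a b hle hne => lt_of_le_of_ne hle hne) hple hnds
  have hpw : (m :: PySem.List.sorted (l.filter (fun k => k != m)) (fun x => x) false).Pairwise
      (fun a b => (fun x => x) a < (fun x => x) b) := by
    refine List.Pairwise.cons ?_ hplt
    intro y hy
    have hy' : y ∈ l.filter (fun k => k != m) := (PySem.List.mem_sorted _ _ _ _).1 hy
    have hyl : y ∈ l := List.mem_of_mem_filter hy'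
    have hyn : y ≠ m := by
      have := List.of_mem_filter hy'; simpa using this
    exact lt_of_le_of_ne (hmin y hyl) (Ne.symm hyn)
  exact PySem.List.sorted_eq_of_perm_of_pairwise_lt _ _ _ hperm hpw

-- ===== VERDICT (by name: the statement is the Claim_ definition above) =====
theorem return_key_spec : Claim_equal_return_key := by
  intro dic _hdom hpre
  obtain ⟨hne, hnd⟩ := hpre
  unfold Spec_return_key return_key return_key_alt
  dsimp only
  set mv := (PySem.List.max? (dic.map (·.2)) (fun v => v)).getD 0 with hmv
  have hloop := pv_keys_return_eq mv dic [] []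
  simp only [List.nil_append, List.length_nil, Nat.cast_zero] at hloop
  rw [hloop]
  set mtchs := (dic.filter (fun p => p.2 = mv)).map (·.1) with hmat
  -- mtchs is nonempty
  have hvne : dic.map (·.2) ≠ [] := by simpa using hne
  obtain ⟨v0, hv0⟩ : ∃ v, PySem.List.max? (dic.map (·.2)) (fun v => v) = some v := by
    cases h : PySem.List.max? (dic.map (·.2)) (fun v => v) with
    | none => exact absurd ((PySem.List.max?_eq_none_iff _ _).mp h) hvne
    | some v => exact ⟨v, rfl⟩
  have hv0mv : v0 = mv := by rw [hmv, hv0]; rfl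
  have hmvmem : mv ∈ dic.map (·.2) := by
    rw [← hv0mv]; exact PySem.List.max?_mem hv0
  have hmne : mtchs ≠ [] := by
    obtain ⟨p, hp, hpv⟩ := List.mem_map.mp hmvmem
    have : p.1 ∈ mtchs := by
      rw [hmat]; exact List.mem_map_of_mem (List.mem_filter.mpr ⟨hp, by simpa using hpv⟩)
    intro h; rw [h] at this; exact (List.not_mem_nil).elim this
  -- mtchs has no duplicates
  have hmnd : mtchs.Nodup := by
    have hsub : (dic.filter (fun p => p.2 = mv)).Sublist dic := List.filter_sublist
    have : ((dic.filter (fun p => p.2 = mv)).map (·.1)).Sublist (dic.map (·.1)) :=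
      List.Sublist.map _ hsub
    exact List.Nodup.sublist this hnd
  obtain ⟨m1, hm1⟩ : ∃ m, PySem.List.min? mtchs (fun x => x) = some m := by
    cases h : PySem.List.min? mtchs (fun x => x) with
    | none => exact absurd ((PySem.List.min?_eq_none_iff _ _).mp h) hmne
    | some m => exact ⟨m, rfl⟩
  by_cases hlen : mtchs.length = 1
  · -- a single matching key: A takes index 0 of the unsorted list, B its sole element
    obtain ⟨k, hk⟩ := List.length_eq_one_iff.mp hlen
    rw [if_neg (by rw [hk]; simp), if_pos hlen]
  · have hlen2 : 1 < mtchs.length := by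
      have h0 : mtchs.length ≠ 0 := fun h => hmne (List.length_eq_zero_iff.mp h)
      omega
    rw [if_pos hlen2, if_neg hlen]
    rw [pv_sorted_min_cons mtchs m1 hmnd hm1, hm1]
    simp only [Option.getD_some]
    -- index 1 of (m1 :: sorted rest) is head of sorted rest, which is min of rest
    set rest := mtchs.filter (fun k => k != m1) with hrest
    have hrne : rest ≠ [] := by
      have hlr : rest.length = mtchs.length - 1 := by
        have he := List.Nodup.erase_eq_filter hmnd m1
        rw [hrest, ← he, List.length_erase_of_mem (PySem.List.min?_mem hm1)]
      intro h
      rw [h] at hlr; simp at hlr; omega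
    obtain ⟨m2, hm2⟩ : ∃ m, PySem.List.min? rest (fun x => x) = some m := by
      cases h : PySem.List.min? rest (fun x => x) with
      | none => exact absurd ((PySem.List.min?_eq_none_iff _ _).mp h) hrne
      | some m => exact ⟨m, rfl⟩
    have hrnd : rest.Nodup := List.Nodup.filter _ hmnd
    rw [pv_sorted_min_cons rest m2 hrnd hm2, hm2]
    simp [PySem.List.pyGetD]
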